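-- pv_equiv track=rewrite | github.com/Dennis1989/CAD-Collection-and-Ranking | blueprints/ranking_task/ranking_utils.py | aggregate_rankings_top_count
-- ===== SOURCE A (Python) =====
-- def aggregate_rankings_top_count(orderings):
--     """
--     Given a list of orderings of some base set, order the elements by the number of times they got ranked best.
--
--     @param orderings List of orderings. They are assumed to contain the same elements and have the same length.
--     """
--     elements = orderings[0]
--
--     # count the number of times every element ranked best
--     top_counts = {elem: 0 for elem in elements}
--     for ordering in orderings:
--         top_counts[ordering[0]] += 1
--
--     # create dictionary which keys are top-counts and values are sets of elements with that top count
--     score_dict = {score: set() for score in top_counts.values()}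
--     for (elem, top_count) in top_counts.items():
--         score_dict[top_count].add(elem)
--
--     # return sorted list
--     return [elems for (top_count, elems) in sorted(score_dict.items(), key=lambda x: x[0], reverse=True)]
-- ===== SOURCE B (Python) =====
-- def aggregate_rankings_top_count(orderings):
--     firsts = [ordering[0] for ordering in orderings]
--     elems = list(dict.fromkeys(orderings[0]))
--     return [{e for e in elems if firsts.count(e) == c}
--             for c in sorted({firsts.count(e) for e in elems}, reverse=True)]
-- ===== Notes on version B (the rewrite author's own statement) =====
-- stated objective: alternative
-- what changed: A builds two mutable dicts (an element counter seeded with zeros, then score->set buckets) and sorts the bucket items; B is a pure comprehension pipeline with no dicts: dedup orderings[0], recount the heads with list.count, sort the distinct scores descending and build each group by filtering the deduped elements.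
import Mathlib
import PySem

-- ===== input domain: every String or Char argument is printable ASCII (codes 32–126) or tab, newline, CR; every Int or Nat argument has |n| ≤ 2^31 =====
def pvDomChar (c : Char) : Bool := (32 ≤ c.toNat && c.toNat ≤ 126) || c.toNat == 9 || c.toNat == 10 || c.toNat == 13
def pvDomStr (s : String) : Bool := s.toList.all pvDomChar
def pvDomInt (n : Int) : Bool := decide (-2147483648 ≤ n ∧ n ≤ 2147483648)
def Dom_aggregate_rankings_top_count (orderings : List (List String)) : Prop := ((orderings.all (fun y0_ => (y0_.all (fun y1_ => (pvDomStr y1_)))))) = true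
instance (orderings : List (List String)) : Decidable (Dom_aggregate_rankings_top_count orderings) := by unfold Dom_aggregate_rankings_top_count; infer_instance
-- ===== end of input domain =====

-- B replaces A's two mutable dicts (per-element counter, score→set buckets) by a pure
-- comprehension pipeline: dedup the base set, recount heads with list.count, sort the
-- distinct scores descending and build each group by filtering; equal return values
-- (the claimed objective is 'alternative', not speed).

-- ===== PORT A =====
def aggregate_rankings_top_count (orderings : List (List String)) : List (List String) :=
  match orderings with
  | [] => []          -- Python: orderings[0] raises IndexError; excluded by Pre_
  | elements :: _ =>
    -- top_counts = {elem: 0 for elem in elements}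
    let top_counts : PySem.Dict String Int :=
      elements.foldl (fun d e => d.insert e 0) PySem.Dict.empty
    -- for ordering in orderings: top_counts[ordering[0]] += 1
    let top_counts := orderings.foldl
      (fun d o => match PySem.List.pyGet? o 0 with
        | none => d    -- Python: ordering[0] raises IndexError; excluded by Pre_
        | some k => d.insert k (d.getD k 0 + 1)) top_counts
        -- (Python raises KeyError when k is no key; Pre_ excludes that, so getD = the stored value)
    -- score_dict = {score: set() for score in top_counts.values()}
    let score_dict : PySem.Dict Int (PySem.Set String) :=
      top_counts.values.foldl (fun d s => d.insert s PySem.Set.empty) PySem.Dict.empty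
    -- for (elem, top_count) in top_counts.items(): score_dict[top_count].add(elem)
    let score_dict := top_counts.items.foldl
      (fun d p => d.insert p.2 (PySem.Set.add (d.getD p.2 PySem.Set.empty) p.1)) score_dict
    -- [elems for (top_count, elems) in sorted(score_dict.items(), key=..., reverse=True)]
    (PySem.List.sorted score_dict.items (fun x => x.1) true).map (fun p => p.2)

-- ===== PORT B =====
def aggregate_rankings_top_count_alt (orderings : List (List String)) : List (List String) :=
  match orderings with
  | [] => []          -- Python: orderings[0] raises IndexError; excluded by Pre_
  | first :: _ =>
    -- firsts = [ordering[0] for ordering in orderings]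
    let firsts := orderings.map (fun o => (PySem.List.pyGet? o 0).getD "")
      -- (Python raises IndexError on an empty ordering; excluded by Pre_)
    -- elems = list(dict.fromkeys(orderings[0]))
    let elems := PySem.List.dedup first
    -- [{e for e in elems if firsts.count(e) == c} for c in sorted({firsts.count(e) for e in elems}, reverse=True)]
    (PySem.List.sorted (PySem.Set.ofList (elems.map (fun e => (firsts.count e : Int)))) (fun x => x) true).map
      (fun c => PySem.Set.ofList (elems.filter (fun e => ((firsts.count e : Int) == c))))

-- ===== PRECONDITION & SPEC =====
-- Pre_ excludes exactly the inputs where Python A raises: empty orderings (IndexError on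
-- orderings[0]), an empty ordering (IndexError on ordering[0]), and an ordering whose first
-- element is not in orderings[0] (KeyError on top_counts[ordering[0]]).
def Pre_aggregate_rankings_top_count (orderings : List (List String)) : Prop :=
  orderings ≠ [] ∧ ∀ o ∈ orderings, o ≠ [] ∧ o.headD "" ∈ orderings.headD []
instance (orderings : List (List String)) : Decidable (Pre_aggregate_rankings_top_count orderings) := by unfold Pre_aggregate_rankings_top_count; infer_instance
def pvWitness_aggregate_rankings_top_count : List (List String) := [["a", "b"], ["b", "a"], ["a", "b"]]

def Spec_aggregate_rankings_top_count (orderings : List (List String)) (out : List (List String)) : Prop := out = aggregate_rankings_top_count_alt orderings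
instance (orderings : List (List String)) (out : List (List String)) : Decidable (Spec_aggregate_rankings_top_count orderings out) := by unfold Spec_aggregate_rankings_top_count; infer_instance

-- ===== CLAIM (what is proved, stated in full; the proofs are below) =====
def Claim_equal_aggregate_rankings_top_count : Prop := ∀ (orderings : List (List String)), Dom_aggregate_rankings_top_count orderings → Pre_aggregate_rankings_top_count orderings → Spec_aggregate_rankings_top_count orderings (aggregate_rankings_top_count orderings)

-- ===== LEMMAS AND PROOFS =====

-- adding an element already present leaves a PySem.Set unchanged, so does update by a subset
theorem pvSetUpdateOfSubset {α : Type} [BEq α] [LawfulBEq α] (l : List α) (s : PySem.Set α)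
    (h : ∀ x ∈ l, x ∈ s) : PySem.Set.update s l = s := by
  induction l generalizing s with
  | nil => rfl
  | cons a t ih =>
      have ha : PySem.Set.add s a = s := by
        simp [PySem.Set.add, PySem.Set.contains, h a (by simp)]
      simp only [PySem.Set.update, List.foldl_cons] at *
      rw [ha]
      exact ih s fun x hx => h x (List.mem_cons_of_mem _ hx)

-- a seeding loop that inserts the same constant value leaves every getD-at-that-default alone
theorem pvGetDFoldlInsertConst {κ ν : Type} [BEq κ] [LawfulBEq κ] [DecidableEq κ]
    (l : List κ) (v : ν) (d : PySem.Dict κ ν) (k : κ) (h : d.getD k v = v) :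
    (l.foldl (fun d e => d.insert e v) d).getD k v = v := by
  induction l generalizing d with
  | nil => exact h
  | cons a t ih =>
      refine ih _ ?_
      rw [PySem.Dict.getD_insert]
      split <;> simp [h]

-- the bucket-building loop: the set stored under c collects, in order, the first components
-- of the pairs whose second component is c
theorem pvGroupFoldGetD (L : List (String × Int)) (d : PySem.Dict Int (PySem.Set String)) (c : Int) :
    (L.foldl (fun d p => d.insert p.2 (PySem.Set.add (d.getD p.2 PySem.Set.empty) p.1)) d).getD c PySem.Set.empty
      = ((L.filter (fun p => p.2 == c)).map (fun p => p.1)).foldl PySem.Set.add (d.getD c PySem.Set.empty) := by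
  induction L generalizing d with
  | nil => rfl
  | cons p t ih =>
      simp only [List.foldl_cons, ih]
      by_cases hc : p.2 = c
      · simp [hc]
      · simp [hc]
        rw [PySem.Dict.getD_insert, if_neg (Ne.symm hc)]

-- the counting loop of A, under Pre_, is the plain counting loop over the heads list
theorem pvCountFoldEq (orderings : List (List String)) (d : PySem.Dict String Int)
    (h : ∀ o ∈ orderings, o ≠ []) :
    orderings.foldl
      (fun d o => match PySem.List.pyGet? o 0 with
        | none => d
        | some k => d.insert k (d.getD k 0 + 1)) d
    = (orderings.map (fun o => (PySem.List.pyGet? o 0).getD "")).foldl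
        (fun d k => d.insert k (d.getD k 0 + 1)) d := by
  rw [List.foldl_map]
  apply PySem.List.foldl_congr_mem
  intro acc o ho
  obtain ⟨a, t, rfl⟩ := List.exists_cons_of_ne_nil (h o ho)
  simp [PySem.List.pyGet?, PySem.List.pyIdx?]

theorem aggregate_rankings_top_count_main (orderings : List (List String))
    (hpre : Pre_aggregate_rankings_top_count orderings) :
    aggregate_rankings_top_count orderings = aggregate_rankings_top_count_alt orderings := by
  obtain ⟨hne, hall⟩ := hpre
  match orderings with
  | [] => exact absurd rfl hne
  | first :: rest =>
    unfold aggregate_rankings_top_count aggregate_rankings_top_count_alt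
    simp only []
    rw [pvCountFoldEq _ _ (fun o ho => (hall o ho).1)]
    rw [show PySem.List.dedup first = PySem.Set.ofList first from rfl]
    set F : List String := (first :: rest).map (fun o => (PySem.List.pyGet? o 0).getD "") with hF
    set E : PySem.Set String := PySem.Set.ofList first with hE
    -- heads are elements of E
    have hheads : ∀ x ∈ F, x ∈ E := by
      intro x hx
      rw [hF] at hx
      obtain ⟨o, ho, rfl⟩ := List.mem_map.mp hx
      obtain ⟨hne', hmem⟩ := hall o ho
      obtain ⟨a, t, rfl⟩ := List.exists_cons_of_ne_nil hne'
      simpa [hE, PySem.Set.mem_ofList, PySem.List.pyGet?, PySem.List.pyIdx?] using hmem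
    have hE_nodup : E.Nodup := PySem.Set.nodup_ofList first
    -- ===== the counter dict of A =====
    set tc : PySem.Dict String Int := F.foldl (fun d k => d.insert k (d.getD k 0 + 1))
      (first.foldl (fun d e => d.insert e (0 : Int)) PySem.Dict.empty) with htc
    have hseed_getD : ∀ k, (first.foldl (fun d e => d.insert e (0 : Int)) PySem.Dict.empty).getD k 0 = 0 :=
      fun k => pvGetDFoldlInsertConst first (0 : Int) _ k (by simp [pysem])
    have hseed_keys : (first.foldl (fun d e => d.insert e (0 : Int)) PySem.Dict.empty).keys = E := by
      rw [PySem.Dict.keys_foldl_insert (f := fun _ _ => (0 : Int))]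
      simp [PySem.Dict.keys_empty, PySem.Set.update, PySem.Set.ofList_eq_foldl, hE]
    have htc_getD : ∀ k, tc.getD k 0 = (F.count k : Int) := by
      intro k
      rw [htc, PySem.Dict.getD_foldl_insert_add_one, hseed_getD]
      simp
    have htc_keys : tc.keys = E := by
      rw [htc, PySem.Dict.keys_foldl_insert (f := fun d k => d.getD k 0 + 1), hseed_keys]
      exact pvSetUpdateOfSubset F E hheads
    have htc_nodup : tc.keys.Nodup := by rw [htc_keys]; exact hE_nodup
    have htc_items : tc.items = E.map (fun e => (e, (F.count e : Int))) := by
      rw [PySem.Dict.items_eq_map_keys tc htc_nodup 0, htc_keys]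
      exact List.map_congr_left (fun e _ => by rw [htc_getD])
    have htc_values : tc.values = E.map (fun e => (F.count e : Int)) := by
      rw [PySem.Dict.values_eq_map_keys tc htc_nodup 0, htc_keys]
      exact List.map_congr_left (fun e _ => by rw [htc_getD])
    rw [htc_items, htc_values]
    set C : List Int := E.map (fun e => (F.count e : Int)) with hC
    set G : Int → PySem.Set String := fun c => PySem.Set.ofList (E.filter (fun e => ((F.count e : Int) == c))) with hG
    -- ===== the score dict of A =====
    set sd := (E.map (fun e => (e, (F.count e : Int)))).foldl
      (fun d p => d.insert p.2 (PySem.Set.add (d.getD p.2 PySem.Set.empty) p.1))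
      (C.foldl (fun d s => d.insert s PySem.Set.empty) PySem.Dict.empty) with hsd
    have hsd0_getD : ∀ c, (C.foldl (fun (d : PySem.Dict Int (PySem.Set String)) s => d.insert s PySem.Set.empty) PySem.Dict.empty).getD c PySem.Set.empty = PySem.Set.empty := by
      intro c
      exact pvGetDFoldlInsertConst C PySem.Set.empty PySem.Dict.empty c (by simp [pysem])
    have hsd0_keys : (C.foldl (fun (d : PySem.Dict Int (PySem.Set String)) s => d.insert s PySem.Set.empty) PySem.Dict.empty).keys = PySem.Set.ofList C := by
      rw [PySem.Dict.keys_foldl_insert (f := fun _ _ => PySem.Set.empty)]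
      simp [PySem.Dict.keys_empty, PySem.Set.update, PySem.Set.ofList_eq_foldl]
    have hmapsnd : (E.map (fun e => (e, (F.count e : Int)))).map (fun p : String × Int => p.2) = C := by
      rw [List.map_map]; rfl
    have hsd_keys : sd.keys = PySem.Set.ofList C := by
      rw [hsd, PySem.Dict.keys_foldl_insert_key (key := fun p : String × Int => p.2)
            (f := fun d p => PySem.Set.add (d.getD p.2 PySem.Set.empty) p.1),
          hsd0_keys, hmapsnd]
      exact pvSetUpdateOfSubset C _ (fun x hx => (PySem.Set.mem_ofList C x).mpr hx)
    have hsd_getD : ∀ c, sd.getD c PySem.Set.empty = G c := by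
      intro c
      rw [hsd, pvGroupFoldGetD, hsd0_getD]
      simp only [hG]
      rw [PySem.Set.ofList_eq_foldl]
      congr 1
      rw [List.filter_map, List.map_map]
      simp [Function.comp_def]
    have hsd_items : sd.items = (PySem.Set.ofList C).map (fun c => (c, G c)) := by
      rw [PySem.Dict.items_eq_map_keys sd (by rw [hsd_keys]; exact PySem.Set.nodup_ofList C) PySem.Set.empty, hsd_keys]
      exact List.map_congr_left (fun c _ => by rw [hsd_getD])
    rw [hsd_items]
    -- ===== the sort on distinct scores =====
    set D := PySem.List.sorted (PySem.Set.ofList C) (fun x => x) true with hD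
    have hD_perm : D.Perm (PySem.Set.ofList C) := PySem.List.sorted_perm _ _ _
    have hD_gt : D.Pairwise (fun a b => b < a) := by
      have h1 : D.Pairwise (fun a b : Int => b ≤ a) := PySem.List.sorted_pairwise_rev _ _
      have h2 : D.Nodup := hD_perm.symm.nodup (PySem.Set.nodup_ofList C)
      exact (h1.and h2).imp (fun h => lt_of_le_of_ne h.1 (Ne.symm h.2))
    have hsorted : PySem.List.sorted ((PySem.Set.ofList C).map (fun c => (c, G c))) (fun x => x.1) true
        = D.map (fun c => (c, G c)) := by
      refine PySem.List.sorted_rev_eq_of_perm_of_pairwise_gt _ _ (fun x : Int × PySem.Set String => x.1) ?_ ?_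
      · exact hD_perm.map _
      · exact hD_gt.map _ (fun a b h => h)
    rw [hsorted, List.map_map]
    rfl

-- ===== VERDICT (by name: the statement is the Claim_ definition above) =====
theorem aggregate_rankings_top_count_spec : Claim_equal_aggregate_rankings_top_count := by
  intro orderings _ hpre
  unfold Spec_aggregate_rankings_top_count
  exact aggregate_rankings_top_count_main orderings hpre
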